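-- pv_equiv track=rewrite | github.com/HAAIL-Universe/AgentZero | A2/work/V092_regex_repair/regex_repair.py | _chars_to_ranges
-- ===== SOURCE A (Python) =====
-- def _chars_to_ranges(chars):
--     """Convert sorted list of chars to ranges."""
--     if not chars:
--         return []
--     ranges = []
--     start = chars[0]
--     end = chars[0]
--     for c in chars[1:]:
--         if ord(c) == ord(end) + 1:
--             end = c
--         else:
--             ranges.append((start, end))
--             start = c
--             end = c
--     ranges.append((start, end))
--     return ranges
-- ===== SOURCE B (Python) =====
-- def _chars_to_ranges(chars):
--     """Convert sorted list of chars to ranges."""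
--     starts = [c for i, c in enumerate(chars) if i == 0 or ord(c) != ord(chars[i - 1]) + 1]
--     ends = [c for i, c in enumerate(chars) if i == len(chars) - 1 or ord(chars[i + 1]) != ord(c) + 1]
--     return list(zip(starts, ends))
-- ===== Notes on version B (the rewrite author's own statement) =====
-- stated objective: alternative
-- what changed: Computes the run-start characters and run-end characters as two independent filtered passes over neighbouring pairs and zips them into ranges, instead of A's single loop carrying running start/end state and appending on breaks.
import Mathlib
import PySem

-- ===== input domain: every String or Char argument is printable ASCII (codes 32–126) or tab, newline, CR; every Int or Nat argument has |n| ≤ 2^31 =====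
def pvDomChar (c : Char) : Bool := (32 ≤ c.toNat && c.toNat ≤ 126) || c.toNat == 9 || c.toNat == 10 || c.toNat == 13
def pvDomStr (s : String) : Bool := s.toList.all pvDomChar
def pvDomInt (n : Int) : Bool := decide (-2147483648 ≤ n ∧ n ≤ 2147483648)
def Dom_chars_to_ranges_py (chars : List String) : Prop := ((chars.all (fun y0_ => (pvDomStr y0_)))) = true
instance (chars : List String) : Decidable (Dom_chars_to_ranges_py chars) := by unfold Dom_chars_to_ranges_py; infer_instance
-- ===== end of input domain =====

-- B computes the run-start and run-end characters in two independent filtered passes and zips them,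
-- instead of A's single loop carrying running start/end state (alternative decomposition, same cost).

-- Python ord on a one-character string (both sources call ord; exact on Pre_, where every string has one char)
def charOrd (s : String) : Int :=
  match s.toList with
  | [c] => (c.toNat : Int)
  | _ => 0

-- ===== PORT A =====
-- the loop 'for c in chars[1:]', carrying ranges/start/end
def ctrLoop (ranges : List (String × String)) (start endc : String) :
    List String → List (String × String)
  | [] => ranges ++ [(start, endc)]
  | c :: cs =>
    if charOrd c = charOrd endc + 1 then ctrLoop ranges start c cs
    else ctrLoop (ranges ++ [(start, endc)]) c c cs

def chars_to_ranges_py (chars : List String) : List (String × String) :=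
  match chars with
  | [] => []
  | c :: cs => ctrLoop [] c c cs

-- ===== PORT B =====
-- '[c for i, c in enumerate(chars) if i == 0 or ord(c) != ord(chars[i-1]) + 1]':
-- the first element always passes; later ones pass when the previous char does not continue the run
def startsAux (prev : String) : List String → List String
  | [] => []
  | c :: cs => (if charOrd c ≠ charOrd prev + 1 then [c] else []) ++ startsAux c cs

def startsB : List String → List String
  | [] => []
  | c :: cs => c :: startsAux c cs

-- '[c for i, c in enumerate(chars) if i == len(chars)-1 or ord(chars[i+1]) != ord(c) + 1]':
-- the last element always passes; earlier ones pass when the next char does not continue the run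
def endsB : List String → List String
  | [] => []
  | [c] => [c]
  | c :: c' :: cs => (if charOrd c' ≠ charOrd c + 1 then [c] else []) ++ endsB (c' :: cs)

def chars_to_ranges_py_alt (chars : List String) : List (String × String) :=
  List.zip (startsB chars) (endsB chars)

-- ===== PRECONDITION & SPEC =====
-- Pre_ excludes exactly the inputs where Python A raises: lists of length ≥ 2 containing a string
-- that is not one character, on which ord raises TypeError (both programs raise there).
def Pre_chars_to_ranges_py (chars : List String) : Prop :=
  chars.length ≤ 1 ∨ ∀ s ∈ chars, s.toList.length = 1
instance (chars : List String) : Decidable (Pre_chars_to_ranges_py chars) := by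
  unfold Pre_chars_to_ranges_py; infer_instance

def pvWitness_chars_to_ranges_py : List String := ["a", "b", "d"]

def Spec_chars_to_ranges_py (chars : List String) (out : List (String × String)) : Prop := out = chars_to_ranges_py_alt chars
instance (chars : List String) (out : List (String × String)) : Decidable (Spec_chars_to_ranges_py chars out) := by unfold Spec_chars_to_ranges_py; infer_instance

-- ===== CLAIM (what is proved, stated in full; the proofs are below) =====
def Claim_equal_chars_to_ranges_py : Prop := ∀ (chars : List String), Dom_chars_to_ranges_py chars → Pre_chars_to_ranges_py chars → Spec_chars_to_ranges_py chars (chars_to_ranges_py chars)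

-- ===== LEMMAS AND PROOFS =====

-- loop invariant: the A-loop with current run (start s, last e) and remaining cs emits the pending
-- ranges, then the zip of the future run-starts (s first) with the run-ends of e :: cs
theorem ctrLoop_eq (cs : List String) :
    ∀ (s e : String) (acc : List (String × String)),
      ctrLoop acc s e cs = acc ++ List.zip (s :: startsAux e cs) (endsB (e :: cs)) := by
  induction cs with
  | nil => intro s e acc; simp [ctrLoop, startsAux, endsB]
  | cons c cs ih =>
    intro s e acc
    by_cases h : charOrd c = charOrd e + 1
    · simp only [ctrLoop, if_pos h]
      rw [ih s c acc]
      simp [startsAux, endsB, h]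
    · simp only [ctrLoop, if_neg h]
      rw [ih c c (acc ++ [(s, e)])]
      simp [startsAux, endsB, h, List.zip]

-- ===== VERDICT (by name: the statement is the Claim_ definition above) =====
theorem chars_to_ranges_py_spec : Claim_equal_chars_to_ranges_py := by
  intro chars _ _
  unfold Spec_chars_to_ranges_py
  cases chars with
  | nil => simp [chars_to_ranges_py, chars_to_ranges_py_alt, startsB, endsB]
  | cons c cs =>
    show ctrLoop [] c c cs = chars_to_ranges_py_alt (c :: cs)
    rw [chars_to_ranges_py_alt, startsB, ctrLoop_eq cs c c []]
    simp
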